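-- pv_equiv track=rewrite | github.com/rajeev121/MyCodes | DAY-4/pos_left_neg_right.py | segregateElements
-- ===== SOURCE A (Python) =====
-- def segregateElements(arr, n):
--         # Your code goes here
--         k=0
--         j=0
--         pos = []
--         neg = []
--         for i in range(n):
--             if arr[i]>0:
--                 pos.append(arr[i])
--             elif arr[i]<0:
--                 neg.append(arr[i])
--
--         pos.extend(neg)
--         arr[:] = pos
--
--         return arr
-- ===== SOURCE B (Python) =====
-- def segregateElements(arr, n):
--     res = sorted((x for x in arr[:n] if x != 0), key=lambda x: x < 0)
--     arr[:] = res
--     return arr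
-- ===== Notes on version B (the rewrite author's own statement) =====
-- stated objective: idiomatic
-- what changed: Replaces the explicit index loop that accumulates into two bucket lists with a zero-dropping filter of arr[:n] followed by a stable sort on the boolean key x < 0 (positives before negatives, order preserved by stability).
-- outside the precondition, e.g. on segregateElements([1, -2, 3], -1): A returns [], B returns [1, -2]
import Mathlib
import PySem

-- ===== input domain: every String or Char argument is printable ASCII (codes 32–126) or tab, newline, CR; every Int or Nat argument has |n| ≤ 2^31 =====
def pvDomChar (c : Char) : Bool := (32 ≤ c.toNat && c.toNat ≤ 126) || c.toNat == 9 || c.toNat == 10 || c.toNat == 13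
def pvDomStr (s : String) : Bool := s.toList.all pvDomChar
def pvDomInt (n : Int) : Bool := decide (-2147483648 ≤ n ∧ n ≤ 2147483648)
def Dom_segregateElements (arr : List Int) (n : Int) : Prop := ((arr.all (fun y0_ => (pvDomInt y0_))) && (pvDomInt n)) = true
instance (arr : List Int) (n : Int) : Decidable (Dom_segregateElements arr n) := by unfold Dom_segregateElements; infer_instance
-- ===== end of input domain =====

-- B replaces A's two-bucket index loop by filter-then-stable-sort on the boolean key x < 0 (idiomatic,
-- same cost class); both mutate arr[:] in Python identically, the equivalence proved is about the return value.


-- ===== PORT A =====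
-- for i in range(n): if arr[i] > 0: pos.append; elif arr[i] < 0: neg.append; then pos.extend(neg)
def segregateElements (arr : List Int) (n : Int) : List Int :=
  let pn : List Int × List Int :=
    (PySem.List.pyRange 0 n 1).foldl
      (fun pn i =>
        if PySem.List.pyGetD arr i 0 > 0 then (pn.1 ++ [PySem.List.pyGetD arr i 0], pn.2)
        else if PySem.List.pyGetD arr i 0 < 0 then (pn.1, pn.2 ++ [PySem.List.pyGetD arr i 0])
        else pn)
      ([], [])
  pn.1 ++ pn.2

-- ===== PORT B =====
-- sorted((x for x in arr[:n] if x != 0), key=lambda x: x < 0)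
def segregateElements_alt (arr : List Int) (n : Int) : List Int :=
  PySem.List.sorted ((PySem.List.slice arr none (some n)).filter (fun x => !(x == 0)))
    (fun x => decide (x < 0))

-- ===== PRECONDITION & SPEC =====
-- Pre_ excludes n > len(arr), where A raises IndexError, and n < 0, where A's [] (empty range) and
-- B's negative-slice result are both accidental readings of a meaningless negative count.
def Pre_segregateElements (arr : List Int) (n : Int) : Prop := 0 ≤ n ∧ n ≤ (arr.length : Int)
instance (arr : List Int) (n : Int) : Decidable (Pre_segregateElements arr n) := by unfold Pre_segregateElements; infer_instance
def pvWitness_segregateElements : List Int × Int := ([3, -1, 0, 2, -5], 5)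

def Spec_segregateElements (arr : List Int) (n : Int) (out : List Int) : Prop := out = segregateElements_alt arr n
instance (arr : List Int) (n : Int) (out : List Int) : Decidable (Spec_segregateElements arr n out) := by unfold Spec_segregateElements; infer_instance

-- ===== CLAIM (what is proved, stated in full; the proofs are below) =====
def Claim_equal_segregateElements : Prop := ∀ (arr : List Int) (n : Int), Dom_segregateElements arr n → Pre_segregateElements arr n → Spec_segregateElements arr n (segregateElements arr n)

-- ===== LEMMAS AND PROOFS =====

-- A's loop body, named for the lemmas below
def segStep (pn : List Int × List Int) (v : Int) : List Int × List Int :=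
  if v > 0 then (pn.1 ++ [v], pn.2)
  else if v < 0 then (pn.1, pn.2 ++ [v])
  else pn

-- A's fold over any value list is filter-by-sign into the two buckets
theorem segStep_fold (ys : List Int) (p q : List Int) :
    ys.foldl segStep (p, q) =
      (p ++ ys.filter (fun x => decide (0 < x)), q ++ ys.filter (fun x => decide (x < 0))) := by
  induction ys generalizing p q with
  | nil => simp
  | cons z zs ih =>
    simp only [List.foldl_cons, List.filter_cons, segStep]
    split_ifs with h1 h2 <;>
      simp_all [List.append_assoc] <;> omega

-- inserting a non-negative element into (falses ++ trues) lands right before the trues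
theorem insertBy_false (x : Int) (hx : ¬ x < 0) (F T : List Int)
    (hF : ∀ y ∈ F, ¬ y < 0) (hT : ∀ y ∈ T, y < 0) :
    PySem.List.insertBy (fun a b => decide ((decide (a < 0) : Bool) < (decide (b < 0) : Bool))) x (F ++ T)
      = F ++ x :: T := by
  induction F with
  | nil =>
    cases T with
    | nil => rfl
    | cons t ts =>
      have ht : t < 0 := hT t (by simp)
      simp [PySem.List.insertBy, hx, ht]
  | cons f fs ih =>
    have hf : ¬ f < 0 := hF f (by simp)
    have hb : (decide ((decide (x < 0) : Bool) < (decide (f < 0) : Bool))) = false := by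
      simp [hx, hf]
    simp only [List.cons_append, PySem.List.insertBy, hb, Bool.false_eq_true, if_false]
    exact congrArg (f :: ·) (ih (fun y hy => hF y (List.mem_cons_of_mem f hy)))

-- inserting a negative element goes to the very end (its key True is never < any key)
theorem insertBy_true (x : Int) (hx : x < 0) (L : List Int) :
    PySem.List.insertBy (fun a b => decide ((decide (a < 0) : Bool) < (decide (b < 0) : Bool))) x L
      = L ++ [x] := by
  apply PySem.List.insertBy_of_forall_not_before
  intro y _
  simp [hx]

-- the stable boolean-key insertion sort is exactly "falses then trues", each in order
theorem sorted_bool_partition (zs : List Int) :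
    PySem.List.sorted zs (fun x => decide (x < 0)) =
      zs.filter (fun x => !(decide (x < 0))) ++ zs.filter (fun x => decide (x < 0)) := by
  rw [PySem.List.sorted_eq_foldl_insertBy]
  suffices h : ∀ (F T : List Int), (∀ y ∈ F, ¬ y < 0) → (∀ y ∈ T, y < 0) →
      zs.foldl (fun acc x => PySem.List.insertBy
        (fun a b => decide ((decide (a < 0) : Bool) < (decide (b < 0) : Bool))) x acc) (F ++ T)
      = (F ++ zs.filter (fun x => !(decide (x < 0)))) ++ (T ++ zs.filter (fun x => decide (x < 0))) by
    simpa using h [] [] (by simp) (by simp)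
  induction zs with
  | nil => intro F T _ _; simp
  | cons z zs ih =>
    intro F T hF hT
    by_cases hz : z < 0
    · have hT' : ∀ y ∈ T ++ [z], y < 0 := by
        intro y hy
        rcases List.mem_append.mp hy with h | h
        · exact hT y h
        · simp at h; omega
      rw [List.foldl_cons, insertBy_true z hz, List.append_assoc, ih F (T ++ [z]) hF hT']
      simp [hz, List.append_assoc]
    · have hF' : ∀ y ∈ F ++ [z], ¬ y < 0 := by
        intro y hy
        rcases List.mem_append.mp hy with h | h
        · exact hF y h
        · simp at h; omega
      have hsplit : F ++ z :: T = (F ++ [z]) ++ T := by simp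
      rw [List.foldl_cons, insertBy_false z hz F T hF hT, hsplit, ih (F ++ [z]) T hF' hT]
      simp [hz, List.append_assoc]

-- ===== VERDICT (by name: the statement is the Claim_ definition above) =====
theorem segregateElements_spec : Claim_equal_segregateElements := by
  intro arr n _ hpre
  obtain ⟨h0, hlen⟩ := hpre
  unfold Spec_segregateElements segregateElements segregateElements_alt
  set ys := arr.take n.toNat with hys
  -- range loop over arr[0..n) = fold over arr.take n
  have hlen' : ((ys.length : Nat) : Int) = n := by
    simp [hys, List.length_take]; omega
  have hfold : (PySem.List.pyRange 0 n 1).foldl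
      (fun pn i =>
        if PySem.List.pyGetD arr i 0 > 0 then (pn.1 ++ [PySem.List.pyGetD arr i 0], pn.2)
        else if PySem.List.pyGetD arr i 0 < 0 then (pn.1, pn.2 ++ [PySem.List.pyGetD arr i 0])
        else pn) (([], []) : List Int × List Int)
      = ys.foldl segStep ([], []) := by
    have hcongr : ∀ pn (i : Int), i ∈ PySem.List.pyRange 0 n 1 →
        (if PySem.List.pyGetD arr i 0 > 0 then (pn.1 ++ [PySem.List.pyGetD arr i 0], pn.2)
         else if PySem.List.pyGetD arr i 0 < 0 then (pn.1, pn.2 ++ [PySem.List.pyGetD arr i 0])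
         else pn)
        = segStep pn (PySem.List.pyGetD ys i 0) := by
      intro pn i hi
      have hi' := (PySem.List.mem_pyRange_one).mp hi
      have hget : PySem.List.pyGetD ys i 0 = PySem.List.pyGetD arr i 0 := by
        rw [PySem.List.pyGetD_eq_getElem (xs := ys) (i := i) (d := 0) hi'.1 (by simp [hys, List.length_take]; omega),
          PySem.List.pyGetD_eq_getElem (xs := arr) (i := i) (d := 0) hi'.1 (by omega)]
        simp [hys, List.getElem_take]
      rw [hget]; rfl
    rw [PySem.List.foldl_congr_mem _ _ _ _ hcongr]
    have := PySem.List.foldl_pyRange_pyGetD (a := 0) (xs := ys) (d := (0:Int))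
      (f := segStep) (init := (([], []) : List Int × List Int)) (by omega)
    have hlen2 : PySem.List.len ys = n := by
      simp [pysem, hys]; omega
    rw [hlen2] at this
    simpa using this
  rw [hfold, segStep_fold]
  -- B's side
  have hsl : PySem.List.slice arr none (some n) = ys := PySem.List.slice_to (xs := arr) (b := n) h0
  rw [hsl, sorted_bool_partition]
  -- filters coincide: nonzero ∧ ¬neg = pos, nonzero ∧ neg = neg
  rw [List.filter_filter, List.filter_filter]
  simp only [List.nil_append]
  congr 1
  · apply List.filter_congr
    intro x _
    rcases lt_trichotomy x 0 with h | h | h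
    · simp [h, show ¬ (0:Int) < x by omega]
    · simp [h]
    · simp [h, show ¬ x < 0 by omega, show x ≠ 0 by omega]
  · apply List.filter_congr
    intro x _
    rcases lt_trichotomy x 0 with h | h | h
    · simp [h, show x ≠ 0 by omega]
    · simp [h]
    · simp [show ¬ x < 0 by omega]
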